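-- pv_equiv track=rewrite | github.com/nwxio/OmniMemory | core/retrieval.py | _best_match_index
-- ===== SOURCE A (Python) =====
-- from typing import Any, Dict, List, Optional, Tuple
--
-- def _best_match_index(text: str, tokens: List[str]) -> int:
--     """Return best-effort match index for any token in text, else 0."""
--     if not text:
--         return 0
--     if not tokens:
--         return 0
--     t = text.casefold()
--     best = None
--     for tok in tokens:
--         i = t.find(tok.casefold())
--         if i < 0:
--             continue
--         if best is None or i < best:
--             best = i
--     return int(best or 0)
-- ===== SOURCE B (Python) =====
-- def _best_match_index(text, tokens):
--     """Return best-effort match index for any token in text, else 0."""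
--     t = text.casefold()
--     toks = [tok.casefold() for tok in tokens]
--     for i in range(len(t)):
--         if any(t[i:i + len(k)] == k for k in toks):
--             return i
--     return 0
-- ===== Notes on version B (the rewrite author's own statement) =====
-- stated objective: faster
-- what changed: B scans positions left-to-right once and returns the first position where any (casefolded) token starts, instead of A's token-major loop that runs a full find() over the whole text per token and keeps the minimum.
import Mathlib
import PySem

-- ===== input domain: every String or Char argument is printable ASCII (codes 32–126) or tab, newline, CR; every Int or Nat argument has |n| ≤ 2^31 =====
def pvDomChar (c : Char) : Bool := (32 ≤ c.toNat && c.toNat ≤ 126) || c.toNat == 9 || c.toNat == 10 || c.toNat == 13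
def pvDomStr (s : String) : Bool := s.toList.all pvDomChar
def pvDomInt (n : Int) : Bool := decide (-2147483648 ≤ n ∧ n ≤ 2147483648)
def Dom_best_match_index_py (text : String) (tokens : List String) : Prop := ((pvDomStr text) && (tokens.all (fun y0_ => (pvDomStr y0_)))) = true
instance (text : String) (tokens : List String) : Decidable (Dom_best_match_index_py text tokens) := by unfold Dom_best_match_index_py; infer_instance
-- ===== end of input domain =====

-- A = token-major loop (a full find per token, keep the minimum); B = position-major
-- left-to-right scan returning the first position where any token starts. Equal everywhere.

-- ===== PORT A =====
-- str.casefold is ported as PySem.Chars.lower (exact on the ASCII domain).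
def best_match_index_py (text : String) (tokens : List String) : Int :=
  if text = "" then 0
  else if tokens = [] then 0
  else
    let t := PySem.Chars.lower text.toList
    let best := tokens.foldl (fun best tok =>
      let i := PySem.Chars.find t (PySem.Chars.lower tok.toList)
      if i < 0 then best
      else match best with
        | none => some i
        | some b => if i < b then some i else best) none
    -- int(best or 0): `or` yields 0 when best is None or 0
    match best with
    | none => 0
    | some b => if b == 0 then 0 else b

-- ===== PORT B =====
-- pvScan toks s i: s is the suffix of the casefolded text starting at position i;
-- return the first i at which some token is a prefix (t[i:i+len(k)] == k), else 0.
def pvScan (toks : List (List Char)) : List Char → Int → Int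
  | [], _ => 0
  | c :: rest, i =>
      if toks.any (fun k => (c :: rest).take k.length == k) then i
      else pvScan toks rest (i + 1)

def best_match_index_py_alt (text : String) (tokens : List String) : Int :=
  let t := PySem.Chars.lower text.toList
  let toks := tokens.map (fun tok => PySem.Chars.lower tok.toList)
  pvScan toks t 0

-- ===== PRECONDITION & SPEC =====
def Spec_best_match_index_py (text : String) (tokens : List String) (out : Int) : Prop := out = best_match_index_py_alt text tokens
instance (text : String) (tokens : List String) (out : Int) : Decidable (Spec_best_match_index_py text tokens out) := by unfold Spec_best_match_index_py; infer_instance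

-- ===== CLAIM (what is proved, stated in full; the proofs are below) =====
def Claim_equal_best_match_index_py : Prop := ∀ (text : String) (tokens : List String), Dom_best_match_index_py text tokens → Spec_best_match_index_py text tokens (best_match_index_py text tokens)

-- ===== LEMMAS AND PROOFS =====

-- condition checked by pvScan at offset j of s
def pvCond (toks : List (List Char)) (s : List Char) (j : Nat) : Bool :=
  toks.any (fun k => (s.drop j).take k.length == k)

lemma pvCond_cons_succ (toks : List (List Char)) (c : Char) (rest : List Char) (j : Nat) :
    pvCond toks (c :: rest) (j + 1) = pvCond toks rest j := by
  simp [pvCond]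

lemma pvCond_iff (toks : List (List Char)) (s : List Char) (j : Nat) :
    pvCond toks s j = true ↔ ∃ k ∈ toks, k <+: s.drop j := by
  simp only [pvCond, List.any_eq_true, beq_iff_eq]
  constructor
  · rintro ⟨k, hk, he⟩
    exact ⟨k, hk, he ▸ List.take_prefix _ _⟩
  · rintro ⟨k, hk, hp⟩
    exact ⟨k, hk, (List.prefix_iff_eq_take.mp hp).symm⟩

lemma pvScan_none (toks : List (List Char)) :
    ∀ (s : List Char) (i0 : Int), (∀ j < s.length, pvCond toks s j = false) →
      pvScan toks s i0 = 0 := by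
  intro s
  induction s with
  | nil => intro i0 _; rfl
  | cons c rest ih =>
      intro i0 h
      have h0 : toks.any (fun k => (c :: rest).take k.length == k) = false := h 0 (by simp)
      simp only [pvScan, h0, Bool.false_eq_true, if_false]
      exact ih (i0 + 1) (fun j hj => by
        have := h (j + 1) (by simpa using Nat.succ_lt_succ hj)
        simpa [pvCond_cons_succ] using this)

lemma pvScan_least (toks : List (List Char)) :
    ∀ (s : List Char) (i0 : Int) (j : Nat), j < s.length →
      pvCond toks s j = true → (∀ j' < j, pvCond toks s j' = false) →
      pvScan toks s i0 = i0 + j := by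
  intro s
  induction s with
  | nil => intro i0 j hj; simp at hj
  | cons c rest ih =>
      intro i0 j hj hQ hmin
      by_cases h0 : pvCond toks (c :: rest) 0 = true
      · have hj0 : j = 0 := by
          by_contra hne
          have := hmin 0 (Nat.pos_of_ne_zero hne)
          simp [this] at h0
        subst hj0
        have h0' : toks.any (fun k => (c :: rest).take k.length == k) = true := h0
        simp [pvScan, h0']
      · have h0' : toks.any (fun k => (c :: rest).take k.length == k) = false :=
          eq_false_of_ne_true h0
        have hjpos : j ≠ 0 := by
          intro h; subst h; exact h0 hQ
        obtain ⟨j', rfl⟩ : ∃ j', j = j' + 1 := ⟨j - 1, by omega⟩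
        simp only [pvScan, h0', Bool.false_eq_true, if_false]
        have := ih (i0 + 1) j' (by simpa using Nat.lt_of_succ_lt_succ hj)
          (by simpa [pvCond_cons_succ] using hQ)
          (fun j'' hj'' => by
            have := hmin (j'' + 1) (by omega)
            simpa [pvCond_cons_succ] using this)
        rw [this]; push_cast; ring

-- the per-token find value A computes
def pvF (t : List Char) (tok : String) : Int := PySem.Chars.find t (PySem.Chars.lower tok.toList)

def pvStep (t : List Char) (best : Option Int) (tok : String) : Option Int :=
  let i := pvF t tok
  if i < 0 then best
  else match best with
    | none => some i
    | some b => if i < b then some i else best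

lemma pvStep_neg (t : List Char) (best : Option Int) (tok : String) (h : pvF t tok < 0) :
    pvStep t best tok = best := by
  simp [pvStep, h]

lemma pvStep_none (t : List Char) (tok : String) (h : ¬ pvF t tok < 0) :
    pvStep t none tok = some (pvF t tok) := by
  simp [pvStep, h]

lemma pvStep_lt (t : List Char) (b0 : Int) (tok : String) (h : ¬ pvF t tok < 0)
    (hlt : pvF t tok < b0) : pvStep t (some b0) tok = some (pvF t tok) := by
  simp [pvStep, h, hlt]

lemma pvStep_ge (t : List Char) (b0 : Int) (tok : String) (h : ¬ pvF t tok < 0)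
    (hlt : ¬ pvF t tok < b0) : pvStep t (some b0) tok = some b0 := by
  simp [pvStep, h, hlt]

lemma pvFold_none (t : List Char) :
    ∀ (toks : List String) (best : Option Int),
      toks.foldl (pvStep t) best = none ↔ best = none ∧ ∀ tok ∈ toks, pvF t tok < 0 := by
  intro toks
  induction toks with
  | nil => simp
  | cons tok rest ih =>
      intro best
      simp only [List.foldl_cons, ih, List.mem_cons]
      by_cases h : pvF t tok < 0
      · rw [pvStep_neg t best tok h]
        constructor
        · rintro ⟨h1, h2⟩
          exact ⟨h1, fun x hx => by rcases hx with rfl | hx; exact h; exact h2 x hx⟩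
        · rintro ⟨h1, h2⟩; exact ⟨h1, fun x hx => h2 x (Or.inr hx)⟩
      · constructor
        · rintro ⟨h1, -⟩
          exfalso
          cases best with
          | none => rw [pvStep_none t tok h] at h1; simp at h1
          | some b0 =>
              by_cases hlt : pvF t tok < b0
              · rw [pvStep_lt t b0 tok h hlt] at h1; simp at h1
              · rw [pvStep_ge t b0 tok h hlt] at h1; simp at h1
        · rintro ⟨-, h2⟩; exact absurd (h2 tok (Or.inl rfl)) h

lemma pvFold_some (t : List Char) :
    ∀ (toks : List String) (best : Option Int) (b : Int),
      toks.foldl (pvStep t) best = some b →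
      (best = some b ∨ ∃ tok ∈ toks, pvF t tok = b ∧ 0 ≤ b) ∧
      (∀ tok ∈ toks, 0 ≤ pvF t tok → b ≤ pvF t tok) ∧
      (∀ b0, best = some b0 → b ≤ b0) := by
  intro toks
  induction toks with
  | nil => intro best b h; simp_all
  | cons tok rest ih =>
      intro best b h
      simp only [List.foldl_cons] at h
      by_cases hneg : pvF t tok < 0
      · rw [pvStep_neg t best tok hneg] at h
        obtain ⟨hmem, hmono, hacc⟩ := ih best b h
        refine ⟨?_, ?_, hacc⟩
        · rcases hmem with h1 | ⟨x, hx, hfx⟩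
          · exact Or.inl h1
          · exact Or.inr ⟨x, List.mem_cons_of_mem _ hx, hfx⟩
        · intro x hx h0
          rcases List.mem_cons.mp hx with rfl | hx
          · omega
          · exact hmono x hx h0
      · cases best with
        | none =>
            rw [pvStep_none t tok hneg] at h
            obtain ⟨hmem, hmono, hacc⟩ := ih _ b h
            refine ⟨?_, ?_, fun b0 hb0 => by simp at hb0⟩
            · rcases hmem with h1 | ⟨x, hx, hfx⟩
              · have hb := (Option.some_inj.mp h1).symm
                exact Or.inr ⟨tok, List.mem_cons_self .., hb.symm, by omega⟩
              · exact Or.inr ⟨x, List.mem_cons_of_mem _ hx, hfx⟩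
            · intro x hx h0
              rcases List.mem_cons.mp hx with rfl | hx
              · exact hacc _ rfl
              · exact hmono x hx h0
        | some b0 =>
            by_cases hlt : pvF t tok < b0
            · rw [pvStep_lt t b0 tok hneg hlt] at h
              obtain ⟨hmem, hmono, hacc⟩ := ih _ b h
              refine ⟨?_, ?_, ?_⟩
              · rcases hmem with h1 | ⟨x, hx, hfx⟩
                · have hb := (Option.some_inj.mp h1).symm
                  exact Or.inr ⟨tok, List.mem_cons_self .., hb.symm, by
                    have := hacc _ rfl; omega⟩
                · exact Or.inr ⟨x, List.mem_cons_of_mem _ hx, hfx⟩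
              · intro x hx h0
                rcases List.mem_cons.mp hx with rfl | hx
                · exact hacc _ rfl
                · exact hmono x hx h0
              · intro b1 hb1
                have := hacc _ rfl
                have := Option.some_inj.mp hb1
                omega
            · rw [pvStep_ge t b0 tok hneg hlt] at h
              obtain ⟨hmem, hmono, hacc⟩ := ih _ b h
              refine ⟨?_, ?_, hacc⟩
              · rcases hmem with h1 | ⟨x, hx, hfx⟩
                · exact Or.inl h1
                · exact Or.inr ⟨x, List.mem_cons_of_mem _ hx, hfx⟩
              · intro x hx h0
                rcases List.mem_cons.mp hx with rfl | hx
                · have := hacc _ rfl; omega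
                · exact hmono x hx h0

-- helper facts used by the verdict proof
lemma pvLower_length (l : List Char) : (PySem.Chars.lower l).length = l.length := by
  simp [PySem.Chars.lower]

lemma pvPrefix_drop_find {t k : List Char} {j : Nat} (hp : k <+: t.drop j) :
    0 ≤ PySem.Chars.find t k ∧ (PySem.Chars.find t k).toNat ≤ j := by
  have hinf : k <:+: t :=
    (PySem.Chars.isIn_iff_infix _ _).mp ((PySem.Chars.exists_prefix_drop_iff_isIn _ _).mp ⟨j, hp⟩)
  have hnn : 0 ≤ PySem.Chars.find t k := (PySem.Chars.find_nonneg_iff _ _).mpr hinf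
  refine ⟨hnn, ?_⟩
  by_contra hgt
  exact (PySem.Chars.find_spec hnn).2 j (by omega) hp

-- ===== VERDICT (by name: the statement is the Claim_ definition above) =====
theorem best_match_index_py_spec : Claim_equal_best_match_index_py := by
  intro text tokens _
  unfold Spec_best_match_index_py best_match_index_py best_match_index_py_alt
  by_cases htext : text = ""
  · subst htext
    rfl
  · rw [if_neg htext]
    by_cases htoks : tokens = []
    · subst htoks
      rw [if_pos rfl]
      exact (pvScan_none [] _ 0 (fun j hj => by simp [pvCond])).symm
    · rw [if_neg htoks]
      simp only []
      set t := PySem.Chars.lower text.toList with ht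
      set toks := tokens.map (fun tok => PySem.Chars.lower tok.toList) with htk
      have htne : 0 < t.length := by
        rw [ht, pvLower_length]
        have hne : text.toList ≠ [] := by
          intro h
          exact htext (by simpa using congrArg String.ofList h)
        cases htl : text.toList with
        | nil => exact absurd htl hne
        | cons a l => simp
      have hfun : (fun (best : Option Int) (tok : String) =>
          let i := PySem.Chars.find t (PySem.Chars.lower tok.toList)
          if i < 0 then best
          else match best with
            | none => some i
            | some b => if i < b then some i else best) = pvStep t := rfl
      rw [hfun]
      cases hres : tokens.foldl (pvStep t) none with
      | none =>
          have hall := ((pvFold_none t tokens none).mp hres).2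
          refine Eq.symm (pvScan_none toks t 0 (fun j hj => ?_))
          cases hcb : pvCond toks t j with
          | false => rfl
          | true =>
          exfalso
          obtain ⟨k, hk, hp⟩ := (pvCond_iff toks t j).mp hcb
          obtain ⟨tok, htok, rfl⟩ := List.mem_map.mp (htk ▸ hk)
          have := (pvPrefix_drop_find hp).1
          have := hall tok htok
          unfold pvF at this
          omega
      | some b =>
          obtain ⟨hmem, hmono, -⟩ := pvFold_some t tokens none b hres
          rcases hmem with h1 | ⟨tok0, htok0, hf0, hb0⟩
          · simp at h1
          have hk0 : PySem.Chars.lower tok0.toList ∈ toks := htk ▸ List.mem_map_of_mem htok0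
          have hp0 : PySem.Chars.lower tok0.toList <+: t.drop b.toNat := by
            have := (PySem.Chars.find_spec (sub := PySem.Chars.lower tok0.toList)
              (s := t) (by unfold pvF at hf0; omega)).1
            unfold pvF at hf0
            rw [hf0] at this
            exact this
          have hblt : b.toNat < t.length := by
            rcases eq_or_ne (PySem.Chars.lower tok0.toList) [] with hk | hk
            · have : pvF t tok0 = 0 := by unfold pvF; rw [hk]; exact PySem.Chars.find_nil t
              have : b = 0 := by omega
              omega
            · have hlen := hp0.length_le
              have : 0 < (PySem.Chars.lower tok0.toList).length := List.length_pos_iff.mpr hk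
              simp only [List.length_drop] at hlen
              omega
          have hcond : pvCond toks t b.toNat = true :=
            (pvCond_iff toks t b.toNat).mpr ⟨_, hk0, hp0⟩
          have hmin : ∀ j' < b.toNat, pvCond toks t j' = false := by
            intro j' hj'
            cases hcb : pvCond toks t j' with
            | false => rfl
            | true =>
            exfalso
            obtain ⟨k, hk, hp⟩ := (pvCond_iff toks t j').mp hcb
            obtain ⟨tok, htok, rfl⟩ := List.mem_map.mp (htk ▸ hk)
            obtain ⟨hnn, hle⟩ := pvPrefix_drop_find hp
            have := hmono tok htok (by unfold pvF; omega)
            unfold pvF at this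
            omega
          have hscan := pvScan_least toks t 0 b.toNat hblt hcond hmin
          rw [hscan]
          show (if (b == 0) = true then (0 : Int) else b) = 0 + (b.toNat : Int)
          rcases eq_or_ne b 0 with rfl | hbne
          · simp
          · rw [if_neg (by simpa using hbne)]
            omega
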